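-- pv_equiv track=rewrite | github.com/pengjichengbest/Algorithm | new_problem.py | maximizeSquareArea
-- ===== SOURCE A (Python) =====
-- def maximizeSquareArea(m, n, hFences, vFences):
--     hFences.append(1)
--     hFences.append(m)
--     vFences.append(1)
--     vFences.append(n)
--     hFences.sort()
--     vFences.sort()
--     memory = set()
--     for i in range(1, len(hFences)):
--         for j in range(i):
--             memory.add(hFences[i] - hFences[j])
--     ans = -1
--     for i in range(1, len(vFences)):
--         for j in range(i):
--             if vFences[i] - vFences[j] in memory:
--                 ans = max(ans, vFences[i] - vFences[j])
--     return ans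
-- ===== SOURCE B (Python) =====
-- def maximizeSquareArea(m, n, hFences, vFences):
--     hFences.append(1)
--     hFences.append(m)
--     vFences.append(1)
--     vFences.append(n)
--     hFences.sort()
--     vFences.sort()
--     hg = sorted({b - a for i, a in enumerate(hFences) for b in hFences[i + 1:]}, reverse=True)
--     vg = sorted({b - a for i, a in enumerate(vFences) for b in vFences[i + 1:]}, reverse=True)
--     i = j = 0
--     while i < len(hg) and j < len(vg):
--         if hg[i] == vg[j]:
--             return hg[i]
--         if hg[i] > vg[j]:
--             i += 1
--         else:
--             j += 1
--     return -1
-- ===== Notes on version B (the rewrite author's own statement) =====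
-- stated objective: alternative
-- what changed: A probes each vertical gap against a hash set of horizontal gaps while threading a running max through nested index loops; B sorts the distinct gaps of each axis in descending order and finds the largest common value with a two-pointer merge scan that early-returns on the first match, with no membership probing and no max-tracking.
import Mathlib
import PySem

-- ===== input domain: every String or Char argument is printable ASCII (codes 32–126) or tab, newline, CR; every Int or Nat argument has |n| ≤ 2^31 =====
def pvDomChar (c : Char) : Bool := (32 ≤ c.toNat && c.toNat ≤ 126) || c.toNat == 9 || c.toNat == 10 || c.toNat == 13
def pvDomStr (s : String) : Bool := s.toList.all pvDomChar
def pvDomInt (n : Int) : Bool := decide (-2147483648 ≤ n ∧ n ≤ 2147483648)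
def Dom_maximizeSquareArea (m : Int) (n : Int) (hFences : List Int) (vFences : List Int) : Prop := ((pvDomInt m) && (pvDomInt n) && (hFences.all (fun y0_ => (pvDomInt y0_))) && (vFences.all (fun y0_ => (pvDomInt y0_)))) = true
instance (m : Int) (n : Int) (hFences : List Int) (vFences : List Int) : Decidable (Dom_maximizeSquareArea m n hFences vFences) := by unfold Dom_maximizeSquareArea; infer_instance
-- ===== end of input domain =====

-- B replaces A's hash-set probe-and-track-max by sorting both gap lists in descending
-- order and a two-pointer merge scan that returns the first (largest) common value.
-- Both Pythons mutate hFences/vFences identically (append 1,m / 1,n and sort in place);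
-- the equivalence proved here is about the return value.

-- ===== PORT A =====
def maximizeSquareArea (m : Int) (n : Int) (hFences : List Int) (vFences : List Int) : Int :=
  let H := PySem.List.sorted (hFences ++ [1] ++ [m]) (fun x => x) false
  let V := PySem.List.sorted (vFences ++ [1] ++ [n]) (fun x => x) false
  let memory : PySem.Set Int :=
    (PySem.List.pyRange 1 (H.length : Int) 1).foldl (fun s i =>
      (PySem.List.pyRange 0 i 1).foldl (fun s j =>
        PySem.Set.add s (PySem.List.pyGetD H i 0 - PySem.List.pyGetD H j 0)) s)
      PySem.Set.empty
  (PySem.List.pyRange 1 (V.length : Int) 1).foldl (fun ans i =>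
    (PySem.List.pyRange 0 i 1).foldl (fun ans j =>
      if PySem.Set.contains memory (PySem.List.pyGetD V i 0 - PySem.List.pyGetD V j 0)
      then max ans (PySem.List.pyGetD V i 0 - PySem.List.pyGetD V j 0) else ans) ans)
    (-1)

-- ===== PORT B =====
-- {b - a for i, a in enumerate(l) for b in l[i+1:]}  — generated as a list, deduped via Set.ofList
def pvGaps (l : List Int) : List Int :=
  (PySem.List.enumerate l 0).flatMap (fun p =>
    (PySem.List.slice l (some (p.1 + 1)) none).map (fun b => b - p.2))

-- the two-pointer while loop over the two descending lists, as recursion on the suffixes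
def pvMerge : List Int → List Int → Int
  | [], _ => -1
  | _, [] => -1
  | x :: xs, y :: ys =>
    if x = y then x
    else if x > y then pvMerge xs (y :: ys)
    else pvMerge (x :: xs) ys

def maximizeSquareArea_alt (m : Int) (n : Int) (hFences : List Int) (vFences : List Int) : Int :=
  let H := PySem.List.sorted (hFences ++ [1] ++ [m]) (fun x => x) false
  let V := PySem.List.sorted (vFences ++ [1] ++ [n]) (fun x => x) false
  let hg := PySem.List.sorted (PySem.Set.ofList (pvGaps H)) (fun x => x) true
  let vg := PySem.List.sorted (PySem.Set.ofList (pvGaps V)) (fun x => x) true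
  pvMerge hg vg

-- ===== PRECONDITION & SPEC =====
def Spec_maximizeSquareArea (m : Int) (n : Int) (hFences : List Int) (vFences : List Int) (out : Int) : Prop := out = maximizeSquareArea_alt m n hFences vFences
instance (m : Int) (n : Int) (hFences : List Int) (vFences : List Int) (out : Int) : Decidable (Spec_maximizeSquareArea m n hFences vFences out) := by unfold Spec_maximizeSquareArea; infer_instance

-- ===== CLAIM (what is proved, stated in full; the proofs are below) =====
def Claim_equal_maximizeSquareArea : Prop := ∀ (m : Int) (n : Int) (hFences : List Int) (vFences : List Int), Dom_maximizeSquareArea m n hFences vFences → Spec_maximizeSquareArea m n hFences vFences (maximizeSquareArea m n hFences vFences)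

-- ===== LEMMAS AND PROOFS =====

-- value x is a pairwise gap of l (later element minus earlier element)
def pvGap (l : List Int) (x : Int) : Prop :=
  ∃ i j : Nat, i < j ∧ j < l.length ∧ x = l.getD j 0 - l.getD i 0

-- membership in a nested "add to set" loop
theorem pv_mem_nested_add {β γ : Type} (g : β → γ → Int) (inner : β → List γ)
    (l : List β) (s : PySem.Set Int) (x : Int) :
    x ∈ l.foldl (fun s b => (inner b).foldl (fun s c => PySem.Set.add s (g b c)) s) s ↔
      x ∈ s ∨ ∃ b ∈ l, ∃ c ∈ inner b, x = g b c := by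
  induction l generalizing s with
  | nil => simp
  | cons hd tl ih =>
    rw [List.foldl_cons, ih]
    have h1 : ∀ (t : List γ) (s : PySem.Set Int),
        x ∈ t.foldl (fun s c => PySem.Set.add s (g hd c)) s ↔
          x ∈ s ∨ ∃ c ∈ t, x = g hd c := by
      intro t
      induction t with
      | nil => simp
      | cons c cs ihc =>
        intro s
        rw [List.foldl_cons, ihc]
        simp [PySem.Set.mem_add]
        tauto
    rw [h1]
    simp only [List.mem_cons]
    constructor
    · rintro ((h | h) | h)
      · exact Or.inl h
      · exact Or.inr ⟨hd, Or.inl rfl, h⟩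
      · obtain ⟨b, hb, hc⟩ := h; exact Or.inr ⟨b, Or.inr hb, hc⟩
    · rintro (h | ⟨b, (rfl | hb), hc⟩)
      · exact Or.inl (Or.inl h)
      · exact Or.inl (Or.inr hc)
      · exact Or.inr ⟨b, hb, hc⟩

-- the nested max-tracking loop: characterisation of the result
theorem pv_nested_ifmax {β γ : Type} (P : Int → Bool) (g : β → γ → Int) (inner : β → List γ)
    (l : List β) (a : Int) :
    (l.foldl (fun a b => (inner b).foldl
        (fun a c => if P (g b c) then max a (g b c) else a) a) a = a ∨
      ∃ b ∈ l, ∃ c ∈ inner b, P (g b c) = true ∧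
        l.foldl (fun a b => (inner b).foldl
          (fun a c => if P (g b c) then max a (g b c) else a) a) a = g b c) ∧
    a ≤ l.foldl (fun a b => (inner b).foldl
        (fun a c => if P (g b c) then max a (g b c) else a) a) a ∧
    ∀ b ∈ l, ∀ c ∈ inner b, P (g b c) = true →
      g b c ≤ l.foldl (fun a b => (inner b).foldl
        (fun a c => if P (g b c) then max a (g b c) else a) a) a := by
  have single : ∀ (b : β) (t : List γ) (a : Int),
      (t.foldl (fun a c => if P (g b c) then max a (g b c) else a) a = a ∨
        ∃ c ∈ t, P (g b c) = true ∧
          t.foldl (fun a c => if P (g b c) then max a (g b c) else a) a = g b c) ∧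
      a ≤ t.foldl (fun a c => if P (g b c) then max a (g b c) else a) a ∧
      ∀ c ∈ t, P (g b c) = true →
        g b c ≤ t.foldl (fun a c => if P (g b c) then max a (g b c) else a) a := by
    intro b t
    induction t with
    | nil => simp
    | cons c cs ihc =>
      intro a
      simp only [List.foldl_cons, List.mem_cons]
      obtain ⟨h1, h2, h3⟩ := ihc (if P (g b c) then max a (g b c) else a)
      refine ⟨?_, ?_, ?_⟩
      · rcases h1 with h1 | ⟨c', hc', hp', he'⟩
        · by_cases hp : P (g b c) = true
          · rcases le_total (g b c) a with hle | hlt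
            · left; rw [h1, hp]; simp only [if_true]; omega
            · right
              refine ⟨c, Or.inl rfl, hp, ?_⟩
              rw [h1, hp]; simp only [if_true]; omega
          · left; rw [Bool.not_eq_true] at hp; rw [h1, hp]; simp
        · right; exact ⟨c', Or.inr hc', hp', he'⟩
      · refine le_trans ?_ h2; split <;> omega
      · rintro c' (rfl | hc') hp
        · refine le_trans ?_ h2; rw [hp]; simp only [if_true]; omega
        · exact h3 c' hc' hp
  induction l generalizing a with
  | nil => simp
  | cons hd tl ih =>
    simp only [List.foldl_cons, List.mem_cons]
    obtain ⟨s1, s2, s3⟩ := single hd (inner hd) a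
    obtain ⟨i1, i2, i3⟩ :=
      ih ((inner hd).foldl (fun a c => if P (g hd c) then max a (g hd c) else a) a)
    refine ⟨?_, le_trans s2 i2, ?_⟩
    · rcases i1 with i1 | ⟨b, hb, c, hc, hp, he⟩
      · rcases s1 with s1 | ⟨c, hc, hp, he⟩
        · left; rw [i1, s1]
        · right; exact ⟨hd, Or.inl rfl, c, hc, hp, by rw [i1, he]⟩
      · right; exact ⟨b, Or.inr hb, c, hc, hp, he⟩
    · rintro b (rfl | hb) c hc hp
      · exact le_trans (s3 c hc hp) i2
      · exact i3 b hb c hc hp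

-- A's memory loop builds exactly the gap set of l
theorem pv_memA_iff (l : List Int) (x : Int) :
    x ∈ (PySem.List.pyRange 1 (l.length : Int) 1).foldl (fun s i =>
        (PySem.List.pyRange 0 i 1).foldl (fun s j =>
          PySem.Set.add s (PySem.List.pyGetD l i 0 - PySem.List.pyGetD l j 0)) s)
        PySem.Set.empty ↔ pvGap l x := by
  rw [pv_mem_nested_add (fun i j => PySem.List.pyGetD l i 0 - PySem.List.pyGetD l j 0)
      (fun i => PySem.List.pyRange 0 i 1)]
  simp only [PySem.List.mem_pyRange_one, PySem.Set.empty, List.not_mem_nil, false_or]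
  constructor
  · rintro ⟨i, ⟨hi1, hi2⟩, j, ⟨hj1, hj2⟩, rfl⟩
    refine ⟨j.toNat, i.toNat, by omega, by omega, ?_⟩
    rw [PySem.List.pyGetD_of_nonneg _ _ (by omega),
        PySem.List.pyGetD_of_nonneg _ _ (by omega)]
  · rintro ⟨i, j, hij, hj, rfl⟩
    refine ⟨(j : Int), ⟨by omega, by omega⟩, (i : Int), ⟨by omega, by omega⟩, ?_⟩
    rw [PySem.List.pyGetD_of_nonneg _ _ (by omega),
        PySem.List.pyGetD_of_nonneg _ _ (by omega)]
    simp

-- B's gap-list comprehension contains exactly the gaps of l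
theorem pv_memB_iff (l : List Int) (x : Int) :
    x ∈ pvGaps l ↔ pvGap l x := by
  unfold pvGaps
  rw [List.mem_flatMap]
  simp only [PySem.List.mem_enumerate_iff, List.mem_map]
  constructor
  · rintro ⟨p, ⟨k, hk, rfl⟩, b, hb, rfl⟩
    rw [PySem.List.slice_from _ (by omega)] at hb
    have hkn : ((0 : Int) + (k : Int) + 1).toNat = k + 1 := by omega
    rw [hkn] at hb
    obtain ⟨t, ht, rfl⟩ := List.mem_iff_getElem.mp hb
    rw [List.length_drop] at ht
    have hlt : k + 1 + t < l.length := by omega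
    refine ⟨k, k + 1 + t, by omega, hlt, ?_⟩
    rw [List.getElem_drop, List.getD_eq_getElem _ _ hlt, List.getD_eq_getElem _ _ (by omega)]
  · rintro ⟨i, j, hij, hj, rfl⟩
    refine ⟨((i : Int), l[i]'(by omega)), ⟨i, by omega, by simp⟩, l[j]'hj, ?_, ?_⟩
    · rw [PySem.List.slice_from _ (by omega)]
      have h1 : ((i : Int) + 1).toNat = i + 1 := by omega
      rw [h1, List.mem_iff_getElem]
      refine ⟨j - (i + 1), ?_, ?_⟩
      · rw [List.length_drop]; omega
      · rw [List.getElem_drop]; congr 1; omega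
    · rw [List.getD_eq_getElem _ _ hj, List.getD_eq_getElem _ _ (by omega)]

-- gaps of a sorted list are nonnegative
theorem pv_gap_nonneg (xs : List Int) (x : Int)
    (h : pvGap (PySem.List.sorted xs (fun y => y) false) x) : 0 ≤ x := by
  obtain ⟨i, j, hij, hj, rfl⟩ := h
  have hmono := PySem.List.sorted_id_getElem_mono (xs := xs) (p := i) (q := j) (by omega) hj
  rw [List.getD_eq_getElem _ _ hj, List.getD_eq_getElem _ _ (by omega)]
  omega

-- the two-pointer merge on descending lists returns the greatest common value, or -1
theorem pv_merge_spec (xs ys : List Int)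
    (hx : xs.Pairwise (fun a b => b ≤ a)) (hy : ys.Pairwise (fun a b => b ≤ a)) :
    (pvMerge xs ys = -1 ∧ ∀ z, z ∈ xs → z ∉ ys) ∨
    (pvMerge xs ys ∈ xs ∧ pvMerge xs ys ∈ ys ∧
      ∀ z, z ∈ xs → z ∈ ys → z ≤ pvMerge xs ys) := by
  induction xs generalizing ys with
  | nil => left; simp [pvMerge]
  | cons x xs' ihx =>
    induction ys with
    | nil => left; simp [pvMerge]
    | cons y ys' ihy =>
      have hx1 := (List.pairwise_cons.mp hx).1
      have hx2 := (List.pairwise_cons.mp hx).2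
      have hy1 := (List.pairwise_cons.mp hy).1
      have hy2 := (List.pairwise_cons.mp hy).2
      by_cases hxy : x = y
      · right
        subst hxy
        refine ⟨by simp [pvMerge], by simp [pvMerge], ?_⟩
        intro z hz _
        have hm : pvMerge (x :: xs') (x :: ys') = x := by simp [pvMerge]
        rw [hm]
        rcases List.mem_cons.mp hz with rfl | hz'
        · exact le_refl _
        · exact hx1 z hz'
      · by_cases hgt : x > y
        · have hm : pvMerge (x :: xs') (y :: ys') = pvMerge xs' (y :: ys') := by
            simp [pvMerge, hxy, hgt]
          have hxny : x ∉ y :: ys' := by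
            intro hmem
            rcases List.mem_cons.mp hmem with rfl | h'
            · omega
            · have := hy1 x h'; omega
          rcases ihx (y :: ys') hx2 hy with ⟨h1, h2⟩ | ⟨h1, h2, h3⟩
          · left
            refine ⟨by rw [hm, h1], ?_⟩
            intro z hz
            rcases List.mem_cons.mp hz with rfl | hz'
            · exact hxny
            · exact h2 z hz'
          · right
            refine ⟨by rw [hm]; exact List.mem_cons_of_mem _ h1, by rw [hm]; exact h2, ?_⟩
            intro z hz hzy
            rw [hm]
            rcases List.mem_cons.mp hz with rfl | hz'
            · exact absurd hzy hxny
            · exact h3 z hz' hzy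
        · have hlt : y > x := by omega
          have hm : pvMerge (x :: xs') (y :: ys') = pvMerge (x :: xs') ys' := by
            simp [pvMerge, hxy, hgt]
          have hynx : y ∉ x :: xs' := by
            intro hmem
            rcases List.mem_cons.mp hmem with heq | h'
            · omega
            · have := hx1 y h'; omega
          rcases ihy hy2 with ⟨h1, h2⟩ | ⟨h1, h2, h3⟩
          · left
            refine ⟨by rw [hm, h1], ?_⟩
            intro z hz hzy
            rcases List.mem_cons.mp hzy with rfl | hzy'
            · exact hynx hz
            · exact h2 z hz hzy'
          · right
            refine ⟨by rw [hm]; exact h1, by rw [hm]; exact List.mem_cons_of_mem _ h2, ?_⟩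
            intro z hz hzy
            rw [hm]
            rcases List.mem_cons.mp hzy with rfl | hzy'
            · exact absurd hz hynx
            · exact h3 z hz hzy'

-- ===== VERDICT (by name: the statement is the Claim_ definition above) =====
theorem maximizeSquareArea_spec : Claim_equal_maximizeSquareArea := by
  intro m n hF vF _
  unfold Spec_maximizeSquareArea maximizeSquareArea maximizeSquareArea_alt
  set H := PySem.List.sorted (hF ++ [1] ++ [m]) (fun x => x) false with hH
  set V := PySem.List.sorted (vF ++ [1] ++ [n]) (fun x => x) false with hV
  set MEM : PySem.Set Int :=
    (PySem.List.pyRange 1 (H.length : Int) 1).foldl (fun s i =>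
      (PySem.List.pyRange 0 i 1).foldl (fun s j =>
        PySem.Set.add s (PySem.List.pyGetD H i 0 - PySem.List.pyGetD H j 0)) s)
      PySem.Set.empty with hMEM
  have hmem : ∀ x, PySem.Set.contains MEM x = true ↔ pvGap H x := by
    intro x
    rw [PySem.Set.contains_iff, hMEM, pv_memA_iff]
  have hA := pv_nested_ifmax (fun d => PySem.Set.contains MEM d)
    (fun i j => PySem.List.pyGetD V i 0 - PySem.List.pyGetD V j 0)
    (fun i => PySem.List.pyRange 0 i 1)
    (PySem.List.pyRange 1 (V.length : Int) 1) (-1)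
  simp only [] at hA
  obtain ⟨h1, h2, h3⟩ := hA
  show (PySem.List.pyRange 1 (V.length : Int) 1).foldl (fun ans i =>
      (PySem.List.pyRange 0 i 1).foldl (fun ans j =>
        if PySem.Set.contains MEM (PySem.List.pyGetD V i 0 - PySem.List.pyGetD V j 0)
        then max ans (PySem.List.pyGetD V i 0 - PySem.List.pyGetD V j 0) else ans) ans)
      (-1) = pvMerge (PySem.List.sorted (PySem.Set.ofList (pvGaps H)) (fun x => x) true)
               (PySem.List.sorted (PySem.Set.ofList (pvGaps V)) (fun x => x) true)
  -- B's sides: membership and descending order of the two sorted gap lists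
  have hmemhg : ∀ x, x ∈ PySem.List.sorted (PySem.Set.ofList (pvGaps H)) (fun x => x) true ↔ pvGap H x := by
    intro x; rw [PySem.List.mem_sorted, PySem.Set.mem_ofList, pv_memB_iff]
  have hmemvg : ∀ x, x ∈ PySem.List.sorted (PySem.Set.ofList (pvGaps V)) (fun x => x) true ↔ pvGap V x := by
    intro x; rw [PySem.List.mem_sorted, PySem.Set.mem_ofList, pv_memB_iff]
  have hpwh := PySem.List.sorted_pairwise_rev (xs := (PySem.Set.ofList (pvGaps H) : List Int)) (key := fun x => x)
  have hpwv := PySem.List.sorted_pairwise_rev (xs := (PySem.Set.ofList (pvGaps V) : List Int)) (key := fun x => x)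
  have hB := pv_merge_spec _ _ hpwh hpwv
  rcases hB with ⟨hB1, hB2⟩ | ⟨hB1, hB2, hB3⟩
  · -- no common gap: A's loop never fires
    rw [hB1]
    rcases h1 with h1 | ⟨i, hi, j, hj, hp, he⟩
    · exact h1
    · exfalso
      rw [PySem.List.mem_pyRange_one] at hi hj
      have hgV : pvGap V (PySem.List.pyGetD V i 0 - PySem.List.pyGetD V j 0) := by
        refine ⟨j.toNat, i.toNat, by omega, by omega, ?_⟩
        rw [PySem.List.pyGetD_of_nonneg _ _ (by omega),
            PySem.List.pyGetD_of_nonneg _ _ (by omega)]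
      exact hB2 _ ((hmemhg _).mpr ((hmem _).mp hp)) ((hmemvg _).mpr hgV)
  · -- common gaps exist: both return the greatest common gap
    set M := pvMerge (PySem.List.sorted (PySem.Set.ofList (pvGaps H)) (fun x => x) true)
      (PySem.List.sorted (PySem.Set.ofList (pvGaps V)) (fun x => x) true) with hMdef
    have hgH : pvGap H M := (hmemhg M).mp hB1
    have hgV : pvGap V M := (hmemvg M).mp hB2
    have hM0 : 0 ≤ M := pv_gap_nonneg (vF ++ [1] ++ [n]) M (by rw [← hV]; exact hgV)
    -- M ≤ A's result
    obtain ⟨iN, jN, hij, hjN, hMe⟩ := hgV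
    have hle1 := h3 (jN : Int) (by rw [PySem.List.mem_pyRange_one]; omega)
      (iN : Int) (by rw [PySem.List.mem_pyRange_one]; omega) (by
        rw [hmem]
        rw [PySem.List.pyGetD_of_nonneg _ _ (by omega),
            PySem.List.pyGetD_of_nonneg _ _ (by omega)]
        simp only [Int.toNat_natCast]
        rw [← hMe]
        exact hgH)
    rw [PySem.List.pyGetD_of_nonneg _ _ (by omega),
        PySem.List.pyGetD_of_nonneg _ _ (by omega)] at hle1
    simp only [Int.toNat_natCast] at hle1
    rw [← hMe] at hle1
    -- A's result ≤ M
    rcases h1 with h1 | ⟨i, hi, j, hj, hp, he⟩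
    · omega
    · rw [PySem.List.mem_pyRange_one] at hi hj
      have hgV' : pvGap V (PySem.List.pyGetD V i 0 - PySem.List.pyGetD V j 0) := by
        refine ⟨j.toNat, i.toNat, by omega, by omega, ?_⟩
        rw [PySem.List.pyGetD_of_nonneg _ _ (by omega),
            PySem.List.pyGetD_of_nonneg _ _ (by omega)]
      have hle2 := hB3 _ ((hmemhg _).mpr ((hmem _).mp hp)) ((hmemvg _).mpr hgV')
      omega
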